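-- pv_equiv track=rewrite | github.com/Benecoder/Schafskopf-Bot-API | schafkopf.py | argmaxsau
-- ===== SOURCE A (Python) =====
-- trumpf_wert = [15,25,35,45,14,24,34,44,
--              37,33,36,32,31,30]
--
-- def argmaxsau(Stich):
--     if Stich[0] not in trumpf_wert:
--         farbe = Stich[0]//10
--         farb_wert = [7,3,6,2,1,0]
--         farb_wert = [farbe*10+i for i in farb_wert]
--         gesamt_wert = trumpf_wert+farb_wert
--     else:
--         gesamt_wert = trumpf_wert
--
--     for i in gesamt_wert:
--         for j in range(4):
--             if i == Stich[j]:
--                 return j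
-- ===== SOURCE B (Python) =====
-- trumpf_wert = [15,25,35,45,14,24,34,44,
--              37,33,36,32,31,30]
--
-- def argmaxsau(Stich):
--     if Stich[0] not in trumpf_wert:
--         farbe = Stich[0]//10
--         gesamt_wert = trumpf_wert + [farbe*10 + i for i in [7,3,6,2,1,0]]
--     else:
--         gesamt_wert = trumpf_wert
--     # rank table: value -> position of its first occurrence in the priority list
--     rank = {}
--     for idx, v in enumerate(gesamt_wert):
--         if v not in rank:
--             rank[v] = idx
--     best = None  # (rank, index) of the best card seen so far
--     for j in range(4):
--         r = rank.get(Stich[j])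
--         if r is not None and (best is None or r < best[0]):
--             best = (r, j)
--     return best[1] if best is not None else None
-- ===== Notes on version B (the rewrite author's own statement) =====
-- stated objective: alternative
-- what changed: A scans the priority list outermost and the four cards innermost, returning on the first hit; B builds a first-occurrence rank dictionary over the priority list once and then makes a single argmin pass over the four cards, keeping the lowest-ranked card with strict less-than so ties break toward the lowest index.
-- outside the precondition, e.g. on argmaxsau([15]): A returns 0, B raises IndexError; on argmaxsau([8, 9, 18, 19]): A returns None, B returns None
import Mathlib
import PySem

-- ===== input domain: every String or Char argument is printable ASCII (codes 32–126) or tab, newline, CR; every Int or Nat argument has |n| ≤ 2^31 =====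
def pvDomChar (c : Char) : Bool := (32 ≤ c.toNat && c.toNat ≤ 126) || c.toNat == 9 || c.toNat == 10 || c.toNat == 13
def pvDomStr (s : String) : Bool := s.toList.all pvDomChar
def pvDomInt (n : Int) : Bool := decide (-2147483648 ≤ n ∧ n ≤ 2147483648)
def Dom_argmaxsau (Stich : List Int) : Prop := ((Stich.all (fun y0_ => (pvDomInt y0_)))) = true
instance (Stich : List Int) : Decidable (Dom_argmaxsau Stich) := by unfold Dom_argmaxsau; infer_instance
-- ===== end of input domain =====

-- B replaces A's nested scan (priority values outer, four cards inner, return on first hit) by a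
-- first-occurrence rank dictionary built once over the priority list plus a single argmin pass over
-- the four cards (objective: alternative data structure, same small fixed cost).

-- module-level constant of the Python file, shared by both ports
def trumpfWert : List Int := [15,25,35,45,14,24,34,44,37,33,36,32,31,30]

-- ===== PORT A =====
def argmaxsau (Stich : List Int) : Int :=
  match PySem.List.pyGet? Stich 0 with
  | none => 0  -- Stich[0]: IndexError, outside Pre_
  | some c0 =>
    let gesamt_wert : List Int :=
      if ¬ (c0 ∈ trumpfWert) then
        trumpfWert ++ [7,3,6,2,1,0].map (fun i => PySem.Int.floordiv c0 10 * 10 + i)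
      else trumpfWert
    match gesamt_wert.findSome? (fun i =>
        (PySem.List.pyRange 0 4 1).findSome? (fun j =>
          if PySem.List.pyGet? Stich j = some i then some j else none)) with
    | some j => j
    | none => 0  -- Python falls through returning None (no card matched), outside Pre_

-- ===== PORT B =====
def argmaxsau_alt (Stich : List Int) : Int :=
  match PySem.List.pyGet? Stich 0 with
  | none => 0  -- Stich[0]: IndexError, outside Pre_
  | some c0 =>
    let gesamt_wert : List Int :=
      if ¬ (c0 ∈ trumpfWert) then
        trumpfWert ++ [7,3,6,2,1,0].map (fun i => PySem.Int.floordiv c0 10 * 10 + i)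
      else trumpfWert
    let rank : PySem.Dict Int Int :=
      (PySem.List.enumerate gesamt_wert 0).foldl
        (fun d p => if d.contains p.2 then d else d.insert p.2 p.1) PySem.Dict.empty
    let best : Option (Int × Int) :=
      (PySem.List.pyRange 0 4 1).foldl
        (fun b j =>
          match PySem.List.pyGet? Stich j with
          | none => b  -- Stich[j]: IndexError, outside Pre_
          | some v =>
            match rank.get? v with
            | none => b
            | some r =>
              match b with
              | none => some (r, j)
              | some q => if r < q.1 then some (r, j) else q) none
    match best with
    | some q => q.2
    | none => 0  -- Python returns None, outside Pre_

-- ===== PRECONDITION & SPEC =====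
-- the priority table A builds from the first card (used only by Pre_, not by the ports)
def gesamtOf (c0 : Int) : List Int :=
  if c0 ∈ trumpfWert then trumpfWert
  else trumpfWert ++ [7,3,6,2,1,0].map (fun i => PySem.Int.floordiv c0 10 * 10 + i)

-- Pre_ restricts to the function's natural domain, tricks of at least four cards (A indexes
-- Stich[0..3] and raises IndexError on shorter lists except when an early card happens to match
-- first; B raises there), and requires one of the first four cards to be in the priority table
-- (otherwise A falls off its loop returning None, which is not an int; B returns None too).
def Pre_argmaxsau (Stich : List Int) : Prop :=
  4 ≤ Stich.length ∧ ∃ v ∈ Stich.take 4, v ∈ gesamtOf (Stich.getD 0 0)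
instance (Stich : List Int) : Decidable (Pre_argmaxsau Stich) := by unfold Pre_argmaxsau; infer_instance

def pvWitness_argmaxsau : List Int := [15, 0, 0, 0]

def Spec_argmaxsau (Stich : List Int) (out : Int) : Prop := out = argmaxsau_alt Stich
instance (Stich : List Int) (out : Int) : Decidable (Spec_argmaxsau Stich out) := by unfold Spec_argmaxsau; infer_instance

-- ===== CLAIM (what is proved, stated in full; the proofs are below) =====
def Claim_equal_argmaxsau : Prop := ∀ (Stich : List Int), Dom_argmaxsau Stich → Pre_argmaxsau Stich → Spec_argmaxsau Stich (argmaxsau Stich)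

-- ===== LEMMAS AND PROOFS =====

-- Dict.contains agrees with Dict.get? (both scan the items list)
theorem dictContains_eq_isSome (d : PySem.Dict Int Int) (v : Int) :
    d.contains v = (d.get? v).isSome := by
  simp only [PySem.Dict.contains, PySem.Dict.get?, Option.isSome_map]
  induction d.items with
  | nil => rfl
  | cons p t ih => by_cases h : (p.1 == v) = true <;> simp [List.any_cons, h, ih]

-- B's rank-building fold looks up to the FIRST occurrence index in the priority list
theorem rank_get (gw : List Int) : ∀ (k : Nat) (d : PySem.Dict Int Int) (v : Int),
    ((PySem.List.enumerate gw (k : Int)).foldl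
        (fun d p => if d.contains p.2 then d else d.insert p.2 p.1) d).get? v
    = (match d.get? v with
       | some r => some r
       | none => (PySem.List.index? gw v).map (fun n => ((k + n : Nat) : Int))) := by
  induction gw with
  | nil =>
    intro k d v
    cases h : d.get? v <;> simp [PySem.List.enumerate, h, PySem.List.index?]
  | cons x t ih =>
    intro k d v
    rw [PySem.List.enumerate_cons]
    simp only [List.foldl_cons]
    have hk1 : (k : Int) + 1 = ((k + 1 : Nat) : Int) := by push_cast; ring
    by_cases hc : d.contains x = true
    · rw [if_pos hc, hk1, ih (k + 1) d v]
      cases h : d.get? v with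
      | some r => rfl
      | none =>
        have hxv : x ≠ v := by
          intro hEq; subst hEq
          rw [dictContains_eq_isSome, h] at hc; simp at hc
        rw [PySem.List.index?_cons_of_ne t hxv, Option.map_map]
        cases hi : PySem.List.index? t v with
        | none => rfl
        | some n =>
          show (some (((k + 1 + n : Nat) : Int)) : Option Int) = some (((k + (n + 1) : Nat) : Int))
          simp only [Option.some.injEq]
          omega
    · rw [if_neg hc, hk1, ih (k + 1) (d.insert x (k : Int)) v]
      by_cases hxv : x = v
      · subst hxv
        rw [PySem.Dict.get?_insert_self]
        have hdx : d.get? x = none := by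
          rw [dictContains_eq_isSome] at hc
          cases h : d.get? x <;> simp [h] at hc ⊢
        rw [hdx, PySem.List.index?_cons_self]
        simp
      · rw [PySem.Dict.get?_insert_of_ne d (k : Int) (fun h => hxv h.symm)]
        cases h : d.get? v with
        | some r => rfl
        | none =>
          rw [PySem.List.index?_cons_of_ne t hxv, Option.map_map]
          cases hi : PySem.List.index? t v with
          | none => rfl
          | some n =>
            show (some (((k + 1 + n : Nat) : Int)) : Option Int) = some (((k + (n + 1) : Nat) : Int))
            simp only [Option.some.injEq]
            omega

-- one step of B's argmin loop, on Nat ranks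
def natStep (b : Option (Nat × Int)) (j : Int) (q : Option Nat) : Option (Nat × Int) :=
  match q with
  | none => b
  | some r =>
    match b with
    | none => some (r, j)
    | some p => if r < p.1 then some (r, j) else p

-- once the best rank is 0 nothing replaces it (ranks are Nats, the comparison is strict)
theorem fold_zero_absorb (F : Int × Int → Option Nat) (j : Int) :
    ∀ (ps : List (Int × Int)),
      ps.foldl (fun b p => natStep b p.1 (F p)) (some (0, j)) = some (0, j) := by
  intro ps
  induction ps with
  | nil => rfl
  | cons p t ih =>
    simp only [List.foldl_cons]
    have h : natStep (some (0, j)) p.1 (F p) = some (0, j) := by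
      cases F p with
      | none => rfl
      | some r => simp [natStep]
    rw [h, ih]

-- shifting every rank by one shifts the result of the argmin loop by one
theorem fold_shift (F : Int × Int → Option Nat) :
    ∀ (ps : List (Int × Int)) (b : Option (Nat × Int)),
      ps.foldl (fun b p => natStep b p.1 ((F p).map (· + 1)))
          (b.map (fun q => (q.1 + 1, q.2)))
      = (ps.foldl (fun b p => natStep b p.1 (F p)) b).map (fun q => (q.1 + 1, q.2)) := by
  intro ps
  induction ps with
  | nil => intro b; rfl
  | cons p t ih =>
    intro b
    simp only [List.foldl_cons]
    have h : natStep (b.map (fun q => (q.1 + 1, q.2))) p.1 ((F p).map (· + 1))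
        = (natStep b p.1 (F p)).map (fun q => (q.1 + 1, q.2)) := by
      cases F p with
      | none => rfl
      | some r =>
        cases b with
        | none => rfl
        | some q => by_cases h : r < q.1 <;> simp [natStep, h]
    rw [h, ih]

-- if the first card matching the head value i has index j0, the argmin loop over ranks in
-- (i :: rest) lands exactly on (0, j0)
theorem foldA (i : Int) (rest : List Int) (j0 : Int) :
    ∀ (ps : List (Int × Int)) (b : Option (Nat × Int)),
      ps.findSome? (fun p => if p.2 = i then some p.1 else none) = some j0 →
      (∀ p', b = some p' → 1 ≤ p'.1) →
      ps.foldl (fun b p => natStep b p.1 (PySem.List.index? (i :: rest) p.2)) b = some (0, j0) := by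
  intro ps
  induction ps with
  | nil => intro b h _; simp at h
  | cons p t ih =>
    intro b hfs hb
    simp only [List.foldl_cons]
    by_cases hpi : p.2 = i
    · rw [List.findSome?_cons] at hfs
      simp [hpi] at hfs
      have hidx : PySem.List.index? (i :: rest) p.2 = some 0 := by
        rw [hpi]; exact PySem.List.index?_cons_self i rest
      have hstep : natStep b p.1 (PySem.List.index? (i :: rest) p.2) = some (0, p.1) := by
        rw [hidx]
        cases b with
        | none => rfl
        | some q =>
          have h1 := hb q rfl
          simp only [natStep]
          rw [if_pos (by omega)]
      rw [hstep, hfs]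
      exact fold_zero_absorb (fun p => PySem.List.index? (i :: rest) p.2) j0 t
    · rw [List.findSome?_cons] at hfs
      simp [hpi] at hfs
      apply ih _ hfs
      intro p' hp'
      have hidx : PySem.List.index? (i :: rest) p.2
          = (PySem.List.index? rest p.2).map (· + 1) :=
        PySem.List.index?_cons_of_ne rest (fun h => hpi h.symm)
      rw [hidx] at hp'
      cases hq : PySem.List.index? rest p.2 with
      | none =>
        rw [hq] at hp'
        simp only [Option.map_none, natStep] at hp'
        exact hb p' hp'
      | some r =>
        rw [hq] at hp'
        simp only [Option.map_some] at hp'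
        cases b with
        | none =>
          simp only [natStep] at hp'
          injection hp' with h
          rw [← h]
          simp
        | some q =>
          simp only [natStep] at hp'
          by_cases hlt : r + 1 < q.1
          · rw [if_pos hlt] at hp'
            injection hp' with h
            rw [← h]
            simp
          · rw [if_neg hlt] at hp'
            injection hp' with h
            exact h ▸ hb q rfl

-- when no card equals the head value i, every rank in (i :: rest) is a shifted rank in rest
theorem fold_congr_ne (i : Int) (rest : List Int) :
    ∀ (ps : List (Int × Int)), (∀ p ∈ ps, p.2 ≠ i) → ∀ (b : Option (Nat × Int)),
      ps.foldl (fun b p => natStep b p.1 (PySem.List.index? (i :: rest) p.2)) b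
      = ps.foldl (fun b p => natStep b p.1 ((PySem.List.index? rest p.2).map (· + 1))) b := by
  intro ps
  induction ps with
  | nil => intro _ b; rfl
  | cons p t ih =>
    intro hne b
    simp only [List.foldl_cons]
    rw [PySem.List.index?_cons_of_ne rest (fun h => hne p (by simp) h.symm)]
    exact ih (fun p hp => hne p (List.mem_cons_of_mem _ hp)) _

-- MAIN LEMMA: A's priority scan equals the argmin (by first-occurrence rank) over the cards
theorem mainLemma (gw : List Int) : ∀ (ps : List (Int × Int)),
    gw.findSome? (fun i => ps.findSome? (fun p => if p.2 = i then some p.1 else none))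
    = (ps.foldl (fun b p => natStep b p.1 (PySem.List.index? gw p.2)) none).map (fun q => q.2) := by
  induction gw with
  | nil =>
    intro ps
    have h : ∀ (ps : List (Int × Int)) (b : Option (Nat × Int)),
        ps.foldl (fun b p => natStep b (p.1 : Int) (none : Option Nat)) b = b := by
      intro ps
      induction ps with
      | nil => intro b; rfl
      | cons p t ihp =>
        intro b
        simp only [List.foldl_cons]
        exact ihp _
    simp [h]
  | cons i rest ih =>
    intro ps
    rw [List.findSome?_cons]
    cases hfs : ps.findSome? (fun p => if p.2 = i then some p.1 else none) with
    | some j0 =>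
      rw [foldA i rest j0 ps none hfs (by simp)]
      rfl
    | none =>
      have hne : ∀ p ∈ ps, p.2 ≠ i := by
        intro p hp hEq
        have := List.findSome?_eq_none_iff.mp hfs p hp
        simp [hEq] at this
      rw [fold_congr_ne i rest ps hne none]
      have hsh := fold_shift (fun p => PySem.List.index? rest p.2) ps none
      simp only [Option.map_none] at hsh
      rw [hsh, ih ps]
      cases ps.foldl (fun b p => natStep b p.1 (PySem.List.index? rest p.2)) none <;> rfl

-- one step of B's Int-valued loop is the Nat-valued step under the cast
theorem castStep (b : Option (Nat × Int)) (j : Int) (q : Option Nat) :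
    (match q.map (fun n => (n : Int)) with
     | none => b.map (fun p => ((p.1 : Int), p.2))
     | some r =>
       match b.map (fun p => ((p.1 : Int), p.2)) with
       | none => some (r, j)
       | some p => if r < p.1 then some (r, j) else p)
    = (natStep b j q).map (fun p => ((p.1 : Int), p.2)) := by
  cases q with
  | none => rfl
  | some r =>
    cases b with
    | none => rfl
    | some p => by_cases h : r < p.1 <;> simp [natStep, h]

-- Python list indexing on a cons cell with the four literal indices
theorem pyGet0 (a : Int) (l : List Int) : PySem.List.pyGet? (a :: l) 0 = some a := by
  simp [PySem.List.pyGet?, PySem.List.pyIdx?]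
theorem pyGet1 (a b : Int) (l : List Int) : PySem.List.pyGet? (a :: b :: l) 1 = some b := by
  simp [PySem.List.pyGet?, PySem.List.pyIdx?]
theorem pyGet2 (a b c : Int) (l : List Int) : PySem.List.pyGet? (a :: b :: c :: l) 2 = some c := by
  simp [PySem.List.pyGet?, PySem.List.pyIdx?, show (2:Int) ≤ (l.length : Int) + 1 + 1 by omega]
theorem pyGet3 (a b c d : Int) (l : List Int) : PySem.List.pyGet? (a :: b :: c :: d :: l) 3 = some d := by
  simp [PySem.List.pyGet?, PySem.List.pyIdx?, show (3:Int) ≤ (l.length : Int) + 1 + 1 + 1 by omega]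

-- ===== VERDICT (by name: the statement is the Claim_ definition above) =====
theorem argmaxsau_spec : Claim_equal_argmaxsau := by
  intro Stich _ hPre
  obtain ⟨hlen, -⟩ := hPre
  unfold Spec_argmaxsau
  rcases Stich with _ | ⟨v0, _ | ⟨v1, _ | ⟨v2, _ | ⟨v3, t⟩⟩⟩⟩ <;> simp at hlen
  have hrange : PySem.List.pyRange 0 4 1 = [0, 1, 2, 3] := by decide
  have hgw : (if ¬ (v0 ∈ trumpfWert) then
        trumpfWert ++ [7,3,6,2,1,0].map (fun i => PySem.Int.floordiv v0 10 * 10 + i)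
      else trumpfWert) = gesamtOf v0 := by
    by_cases h : v0 ∈ trumpfWert <;> simp [gesamtOf, h]
  have hrank : ∀ v : Int,
      ((PySem.List.enumerate (gesamtOf v0) 0).foldl
          (fun d p => if d.contains p.2 then d else d.insert p.2 p.1) PySem.Dict.empty).get? v
      = (PySem.List.index? (gesamtOf v0) v).map (fun n => (n : Int)) := by
    intro v
    have h := rank_get (gesamtOf v0) 0 PySem.Dict.empty v
    simp only [Nat.cast_zero] at h
    rw [h]
    have he : (PySem.Dict.empty : PySem.Dict Int Int).get? v = none := rfl
    rw [he]
    cases hi : PySem.List.index? (gesamtOf v0) v with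
    | none => rfl
    | some n =>
      dsimp only
      simp
  have hAside : argmaxsau (v0 :: v1 :: v2 :: v3 :: t)
      = (match (List.foldl (fun b p => natStep b p.1 (PySem.List.index? (gesamtOf v0) p.2)) none
            [((0 : Int), v0), (1, v1), (2, v2), (3, v3)]).map (fun q => q.2) with
         | some j => j
         | none => 0) := by
    rw [← mainLemma]
    simp only [argmaxsau, pyGet0, hrange, hgw]
    congr 1
    congr 1
    funext i
    by_cases h0 : v0 = i <;> by_cases h1 : v1 = i <;> by_cases h2 : v2 = i <;> by_cases h3 : v3 = i <;>
      simp [pyGet1, pyGet2, pyGet3, h0, h1, h2, h3]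
  have hBside : argmaxsau_alt (v0 :: v1 :: v2 :: v3 :: t)
      = (match (List.foldl (fun b p => natStep b p.1 (PySem.List.index? (gesamtOf v0) p.2)) none
            [((0 : Int), v0), (1, v1), (2, v2), (3, v3)]).map (fun p => ((p.1 : Int), p.2)) with
         | some q => q.2
         | none => 0) := by
    simp only [argmaxsau_alt, pyGet0, pyGet1, pyGet2, pyGet3, hrange, hgw, hrank,
      List.foldl_cons, List.foldl_nil]
    rw [← castStep, ← castStep, ← castStep, ← castStep]
    simp only [Option.map_none]
  rw [hAside, hBside]
  cases List.foldl (fun b p => natStep b p.1 (PySem.List.index? (gesamtOf v0) p.2)) none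
      [((0 : Int), v0), (1, v1), (2, v2), (3, v3)] with
  | none => rfl
  | some p => simp
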